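-- pv_equiv track=rewrite | github.com/elanticrypt0/visualizer | main.py | to_html_with_legend
-- ===== SOURCE A (Python) =====
-- from typing import List, Tuple
--
-- def hex_to_rgb(hex_val: int) -> Tuple[int, int, int]:
--     if hex_val == 0: return (0, 0, 0)
--     elif hex_val == 15: return (255, 255, 255)
--     r = int((hex_val & 0b1100) >> 2) * 85
--     g = int((hex_val & 0b0010) >> 1) * 170
--     b = int(hex_val & 0b0001) * 255
--     return (r, g, b)
--
-- def create_legend() -> str:
--     legend = ['<div style="margin: 20px 0;">',
--               '<h2 style="color: white;">Leyenda de Colores</h2>',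
--               '<div style="display: flex; flex-wrap: wrap; gap: 10px;">']
--
--     for i in range(16):
--         r, g, b = hex_to_rgb(i)
--         legend.append(
--             f'<div style="display: flex; align-items: center; gap: 5px;">'
--             f'<div style="width: 20px; height: 20px; background: rgb({r},{g},{b});"></div>'
--             f'<span style="color: white;">0x{i:X}</span>'
--             '</div>'
--         )
--
--     legend.extend(['</div></div>'])
--     return '\n'.join(legend)
--
-- def to_html_with_legend(data: List[int], width: int, scale: int = 1, show_hex: bool = False) -> str:
--     html = ['<!DOCTYPE html><html><head><style>',
--             '.pixel{display:inline-block;margin:0;padding:0;}',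
--             '.row{height:fit-content;margin:0;padding:0;display:flex;align-items:center;}',
--             '.hex-value{color:#666;margin-left:10px;font-family:monospace;}',
--             '</style></head><body style="background:black;margin:0;padding:10px">']
--
--     # Agregar leyenda
--     html.append(create_legend())
--
--     height = len(data) // width
--     if len(data) % width != 0:
--         height += 1
--
--     for y in range(height):
--         html.append('<div class="row">')
--         for x in range(width):
--             idx = y * width + x
--             if idx < len(data):
--                 r, g, b = hex_to_rgb(data[idx])
--                 html.append(
--                     f'<div class="pixel" style="width:{scale*2}px;'
--                     f'height:{scale}px;background:rgb({r},{g},{b})"></div>'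
--                 )
--
--         if show_hex:
--             hex_values = ' '.join([f'{data[y*width + x]:X}' for x in range(width)
--                                  if y*width + x < len(data)])
--             html.append(f'<span class="hex-value">{hex_values}</span>')
--
--         html.append('</div>')
--
--     html.append('</body></html>')
--     return '\n'.join(html)
-- ===== SOURCE B (Python) =====
-- from typing import List, Tuple
--
-- def hex_to_rgb(hex_val: int) -> Tuple[int, int, int]:
--     if hex_val == 0: return (0, 0, 0)
--     elif hex_val == 15: return (255, 255, 255)
--     r = int((hex_val & 0b1100) >> 2) * 85
--     g = int((hex_val & 0b0010) >> 1) * 170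
--     b = int(hex_val & 0b0001) * 255
--     return (r, g, b)
--
-- def create_legend() -> str:
--     legend = ['<div style="margin: 20px 0;">',
--               '<h2 style="color: white;">Leyenda de Colores</h2>',
--               '<div style="display: flex; flex-wrap: wrap; gap: 10px;">']
--     for i in range(16):
--         r, g, b = hex_to_rgb(i)
--         legend.append(
--             f'<div style="display: flex; align-items: center; gap: 5px;">'
--             f'<div style="width: 20px; height: 20px; background: rgb({r},{g},{b});"></div>'
--             f'<span style="color: white;">0x{i:X}</span>'
--             '</div>'
--         )
--     legend.extend(['</div></div>'])
--     return '\n'.join(legend)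
--
-- def to_html_with_legend(data: List[int], width: int, scale: int = 1, show_hex: bool = False) -> str:
--     # Single streaming pass: a row state-machine driven by i % width, no
--     # height computation, no row slicing, no nested loops.
--     out = ['<!DOCTYPE html><html><head><style>',
--            '.pixel{display:inline-block;margin:0;padding:0;}',
--            '.row{height:fit-content;margin:0;padding:0;display:flex;align-items:center;}',
--            '.hex-value{color:#666;margin-left:10px;font-family:monospace;}',
--            '</style></head><body style="background:black;margin:0;padding:10px">',
--            create_legend()]
--     hex_buf = []
--     for i, v in enumerate(data):
--         if i % width == 0:
--             out.append('<div class="row">')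
--         r, g, b = hex_to_rgb(v)
--         out.append(f'<div class="pixel" style="width:{scale*2}px;'
--                    f'height:{scale}px;background:rgb({r},{g},{b})"></div>')
--         hex_buf.append('%X' % v)
--         if (i + 1) % width == 0:
--             if show_hex:
--                 out.append('<span class="hex-value">' + ' '.join(hex_buf) + '</span>')
--             hex_buf = []
--             out.append('</div>')
--     if hex_buf:
--         if show_hex:
--             out.append('<span class="hex-value">' + ' '.join(hex_buf) + '</span>')
--         out.append('</div>')
--     out.append('</body></html>')
--     return '\n'.join(out)
-- ===== Notes on version B (the rewrite author's own statement) =====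
-- stated objective: alternative
-- what changed: B replaces A's ceiling-division height and nested y/x index loops with a single streaming pass over enumerate(data): a row state-machine that opens a row when i%width==0, closes it (emitting the buffered hex span) when (i+1)%width==0, and flushes a partial last row after the loop; Pre_ restricts to positive width (width 0 raises in A; negative width is an unspecified corner where the two readings differ).
import Mathlib
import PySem

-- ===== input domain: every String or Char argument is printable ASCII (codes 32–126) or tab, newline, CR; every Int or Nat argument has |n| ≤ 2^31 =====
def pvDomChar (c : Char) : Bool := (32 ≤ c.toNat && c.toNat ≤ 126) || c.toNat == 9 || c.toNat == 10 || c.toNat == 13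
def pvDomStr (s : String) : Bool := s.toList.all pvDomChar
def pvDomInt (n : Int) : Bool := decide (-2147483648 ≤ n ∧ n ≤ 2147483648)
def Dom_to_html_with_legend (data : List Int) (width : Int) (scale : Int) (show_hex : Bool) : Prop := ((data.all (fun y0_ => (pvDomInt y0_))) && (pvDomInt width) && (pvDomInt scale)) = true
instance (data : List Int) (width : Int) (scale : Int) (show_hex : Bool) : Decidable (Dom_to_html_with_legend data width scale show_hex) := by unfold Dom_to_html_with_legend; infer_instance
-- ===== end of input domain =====

-- B replaces A's ceiling-division height and nested y/x index loops by a single streaming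
-- pass over enumerate(data): a row state-machine keyed on i % width; same output (alternative decomposition).

-- ===== PORT A =====
-- shared helpers (identical in Source A and Source B): hex_to_rgb, create_legend, the pixel-div
-- f-string, the hex-value span, and f'{n:X}' (uppercase hex, '-' sign, ported by hand; exact for all ints)
def hexDigitChar (n : Nat) : Char := if n < 10 then Char.ofNat (48 + n) else Char.ofNat (55 + n)

def natHexChars (n : Nat) : List Char :=
  if h : n = 0 then [] else natHexChars (n / 16) ++ [hexDigitChar (n % 16)]
decreasing_by exact Nat.div_lt_self (Nat.pos_of_ne_zero h) (by omega)

-- f'{n:X}' / '%X' % n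
def fmtHexU (n : Int) : String :=
  if n < 0 then String.ofList ('-' :: natHexChars n.natAbs)
  else if n = 0 then "0" else String.ofList (natHexChars n.toNat)

def hexToRgb (h : Int) : Int × Int × Int :=
  if h = 0 then (0, 0, 0)
  else if h = 15 then (255, 255, 255)
  else ((PySem.Int.band h 12 >>> 2) * 85, (PySem.Int.band h 2 >>> 1) * 170, PySem.Int.band h 1 * 255)

def createLegend : String :=
  let legend : List String :=
    ["<div style=\"margin: 20px 0;\">",
     "<h2 style=\"color: white;\">Leyenda de Colores</h2>",
     "<div style=\"display: flex; flex-wrap: wrap; gap: 10px;\">"]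
  let legend := (PySem.List.pyRange 0 16 1).foldl (fun acc i =>
    let rgb := hexToRgb i
    acc ++ ["<div style=\"display: flex; align-items: center; gap: 5px;\"><div style=\"width: 20px; height: 20px; background: rgb(" ++ PySem.Int.toStr rgb.1 ++ "," ++ PySem.Int.toStr rgb.2.1 ++ "," ++ PySem.Int.toStr rgb.2.2 ++ ");\"></div><span style=\"color: white;\">0x" ++ fmtHexU i ++ "</span></div>"]) legend
  PySem.Str.join "\n" (legend ++ ["</div></div>"])

-- the pixel f-string both sources emit
def pixelDiv (scale v : Int) : String :=
  let rgb := hexToRgb v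
  "<div class=\"pixel\" style=\"width:" ++ PySem.Int.toStr (scale * 2) ++ "px;height:" ++ PySem.Int.toStr scale ++ "px;background:rgb(" ++ PySem.Int.toStr rgb.1 ++ "," ++ PySem.Int.toStr rgb.2.1 ++ "," ++ PySem.Int.toStr rgb.2.2 ++ ")\"></div>"

-- '<span class="hex-value">' + joined hex values + '</span>' (both sources emit this string)
def hexSpan (buf : List String) : String :=
  "<span class=\"hex-value\">" ++ PySem.Str.join " " buf ++ "</span>"

def htmlHead : List String :=
  ["<!DOCTYPE html><html><head><style>",
   ".pixel{display:inline-block;margin:0;padding:0;}",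
   ".row{height:fit-content;margin:0;padding:0;display:flex;align-items:center;}",
   ".hex-value{color:#666;margin-left:10px;font-family:monospace;}",
   "</style></head><body style=\"background:black;margin:0;padding:10px\">"]

def to_html_with_legend (data : List Int) (width : Int) (scale : Int) (show_hex : Bool) : String :=
  let n : Int := (data.length : Int)
  let html := htmlHead ++ [createLegend]
  let height0 := PySem.Int.floordiv n width
  let height := if PySem.Int.mod n width ≠ 0 then height0 + 1 else height0
  let html := (PySem.List.pyRange 0 height 1).foldl (fun acc y =>
    let acc := acc ++ ["<div class=\"row\">"]
    let acc := (PySem.List.pyRange 0 width 1).foldl (fun acc2 x =>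
      if y * width + x < n then
        acc2 ++ [pixelDiv scale (PySem.List.pyGetD data (y * width + x) 0)]
      else acc2) acc
    let acc := if show_hex then
        acc ++ [hexSpan (((PySem.List.pyRange 0 width 1).filter (fun x => decide (y * width + x < n))).map
            (fun x => fmtHexU (PySem.List.pyGetD data (y * width + x) 0)))]
      else acc
    acc ++ ["</div>"]) html
  PySem.Str.join "\n" (html ++ ["</body></html>"])

-- ===== PORT B =====
-- the body of B's single for-loop over enumerate(data) (state = (out, hex_buf))
def bStep (width scale : Int) (show_hex : Bool) (st : List String × List String) (p : Int × Int) : List String × List String :=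
  let out := if PySem.Int.mod p.1 width = 0 then st.1 ++ ["<div class=\"row\">"] else st.1
  let out := out ++ [pixelDiv scale p.2]
  let buf := st.2 ++ [fmtHexU p.2]
  if PySem.Int.mod (p.1 + 1) width = 0 then
    ((if show_hex then out ++ [hexSpan buf] else out) ++ ["</div>"], [])
  else (out, buf)

def to_html_with_legend_alt (data : List Int) (width : Int) (scale : Int) (show_hex : Bool) : String :=
  let st := (PySem.List.enumerate data 0).foldl (bStep width scale show_hex) (htmlHead ++ [createLegend], [])
  let out := if st.2 ≠ [] then
      (if show_hex then st.1 ++ [hexSpan st.2] else st.1) ++ ["</div>"]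
    else st.1
  PySem.Str.join "\n" (out ++ ["</body></html>"])

-- ===== PRECONDITION & SPEC =====
-- Pre_ excludes non-positive width: at width = 0 A raises ZeroDivisionError (B raises too on
-- non-empty data); a negative width is an unspecified corner on which A's row-less document and
-- B's rows of |width| pixels are each as defensible as the other — neither is the function's value.
def Pre_to_html_with_legend (data : List Int) (width : Int) (scale : Int) (show_hex : Bool) : Prop := 0 < width
instance (data : List Int) (width : Int) (scale : Int) (show_hex : Bool) : Decidable (Pre_to_html_with_legend data width scale show_hex) := by unfold Pre_to_html_with_legend; infer_instance

def pvWitness_to_html_with_legend : List Int × Int × Int × Bool := ([0, 1, 2, 3, 15], 2, 2, true)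

def Spec_to_html_with_legend (data : List Int) (width : Int) (scale : Int) (show_hex : Bool) (out : String) : Prop := out = to_html_with_legend_alt data width scale show_hex
instance (data : List Int) (width : Int) (scale : Int) (show_hex : Bool) (out : String) : Decidable (Spec_to_html_with_legend data width scale show_hex out) := by unfold Spec_to_html_with_legend; infer_instance

-- ===== CLAIM (what is proved, stated in full; the proofs are below) =====
def Claim_equal_to_html_with_legend : Prop := ∀ (data : List Int) (width : Int) (scale : Int) (show_hex : Bool), Dom_to_html_with_legend data width scale show_hex → Pre_to_html_with_legend data width scale show_hex → Spec_to_html_with_legend data width scale show_hex (to_html_with_legend data width scale show_hex)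

-- ===== LEMMAS AND PROOFS =====

-- the lines one row of pixels contributes (both programs emit exactly these, in this order)
def rowLines (scale : Int) (show_hex : Bool) (c : List Int) : List String :=
  "<div class=\"row\">" :: (c.map (pixelDiv scale) ++
    ((if show_hex then [hexSpan (c.map fmtHexU)] else []) ++ ["</div>"]))

-- data cut into rows of wm+1 pixels (proof-side canonical form both ports are reduced to)
def chunks (wm : Nat) : List Int → List (List Int)
  | [] => []
  | x :: xs => (x :: xs).take (wm + 1) :: chunks wm ((x :: xs).drop (wm + 1))
termination_by l => l.length
decreasing_by simp

theorem chunks_nil (wm : Nat) : chunks wm [] = [] := by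
  conv_lhs => unfold chunks

theorem chunks_cons (wm : Nat) (x : Int) (xs : List Int) :
    chunks wm (x :: xs) = (x :: xs).take (wm + 1) :: chunks wm ((x :: xs).drop (wm + 1)) := by
  conv_lhs => unfold chunks

theorem selNat (data : List Int) (a w : Nat) :
    ((List.range w).filter (fun k => decide (a + k < data.length))).map (fun k => data.getD (a + k) 0)
      = (data.drop a).take w := by
  induction w with
  | zero => simp
  | succ w ih =>
    rw [List.range_succ, List.filter_append, List.map_append, ih, List.take_add_one]
    congr 1
    simp only [List.filter_singleton, List.getElem?_drop]
    by_cases h : a + w < data.length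
    · simp [h, List.getD_eq_getElem?_getD]
    · simp [h]

theorem ceilEq (N w : Nat) (hw : 0 < w) :
    (if N % w = 0 then N / w else N / w + 1) = (N + w - 1) / w := by
  have hd := Nat.div_add_mod N w
  have hlt : N % w < w := Nat.mod_lt N hw
  by_cases h : N % w = 0
  · have e1 : N + w - 1 = (w - 1) + w * (N / w) := by omega
    rw [if_pos h, e1, Nat.add_mul_div_left _ _ hw, Nat.div_eq_of_lt (show w - 1 < w by omega),
      Nat.zero_add]
  · have hm : w * (N / w + 1) = w * (N / w) + w := by ring
    have e2 : N + w - 1 = (N % w - 1) + w * (N / w + 1) := by omega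
    rw [if_neg h, e2, Nat.add_mul_div_left _ _ hw,
      Nat.div_eq_of_lt (show N % w - 1 < w by omega), Nat.zero_add]

theorem sel {β : Type} (data : List Int) (f : Int → β) (a w : Nat) :
    (((PySem.List.pyRange 0 (w : Int) 1).filter (fun x => decide ((a : Int) + x < (data.length : Int)))).map
        (fun x => f (PySem.List.pyGetD data ((a : Int) + x) 0)))
      = ((data.drop a).take w).map f := by
  rw [PySem.List.pyRange_zero_natCast, List.filter_map, List.map_map, ← selNat data a w, List.map_map]
  congr 1
  · funext k
    simp only [Function.comp]
    rw [show ((a : Int) + (k : Int)) = ((a + k : Nat) : Int) by push_cast; ring,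
      PySem.List.pyGetD_natCast]
  · apply List.filter_congr
    intro k _
    simp only [Function.comp, decide_eq_decide]
    omega

-- A's row-indexed slices, listed for y = 0 .. ceil(N/w) - 1, are exactly the chunks
theorem chunksEq (wm : Nat) (data : List Int) :
    (List.range ((data.length + (wm + 1) - 1) / (wm + 1))).map
        (fun y => (data.drop ((wm + 1) * y)).take (wm + 1)) = chunks wm data := by
  induction hn : data.length using Nat.strong_induction_on generalizing data with
  | _ N ih =>
  match data with
  | [] =>
    obtain rfl : N = 0 := by simpa using hn.symm
    rw [Nat.div_eq_of_lt (by omega)]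
    simp [chunks_nil]
  | x :: xs =>
    obtain rfl : N = xs.length + 1 := by simpa using hn.symm
    have hstep : (xs.length + 1 + (wm + 1) - 1) / (wm + 1) = xs.length / (wm + 1) + 1 := by
      rw [show xs.length + 1 + (wm + 1) - 1 = xs.length + (wm + 1) by omega,
        Nat.add_div_right _ (Nat.succ_pos wm)]
    have hdlen : ((x :: xs).drop (wm + 1)).length = xs.length - wm := by simp
    have ihd := ih (xs.length - wm) (by omega) ((x :: xs).drop (wm + 1)) (by simp)
    have hcnt : (xs.length - wm + (wm + 1) - 1) / (wm + 1) = xs.length / (wm + 1) := by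
      by_cases hcase : wm ≤ xs.length
      · congr 1; omega
      · rw [show xs.length - wm = 0 by omega, Nat.div_eq_of_lt (by omega),
          Nat.div_eq_of_lt (by omega)]
    rw [hcnt] at ihd
    rw [hstep, List.range_succ_eq_map, List.map_cons, List.map_map, chunks_cons]
    refine congrArg₂ (· :: ·) (by simp) ?_
    rw [← ihd]
    apply List.map_congr_left
    intro y _
    simp only [Function.comp_apply, Nat.succ_eq_add_one]
    rw [List.drop_drop, show wm + 1 + (wm + 1) * y = (wm + 1) * (y + 1) from by ring]

-- B's loop body over one chunk of a row: positions p, p+1, …, p + c.length - 1 inside a row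
theorem bChunk (wm : Nat) (scale : Int) (show_hex : Bool) :
    ∀ (c : List Int) (b p : Nat) (L bs : List String), p + c.length ≤ wm + 1 →
    List.foldl (bStep ((wm + 1 : Nat) : Int) scale show_hex) (L, bs)
        (PySem.List.enumerate c ((b * (wm + 1) + p : Nat) : Int)) =
      ((if p = 0 ∧ c ≠ [] then L ++ ["<div class=\"row\">"] else L) ++ c.map (pixelDiv scale) ++
        (if p + c.length = wm + 1 ∧ c ≠ [] then
          (if show_hex then [hexSpan (bs ++ c.map fmtHexU)] else []) ++ ["</div>"] else []),
       if p + c.length = wm + 1 ∧ c ≠ [] then [] else bs ++ c.map fmtHexU) := by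
  intro c
  induction c with
  | nil => intro b p L bs hlen; simp
  | cons x rest ih =>
    intro b p L bs hlen
    have hplt : p < wm + 1 := by simp at hlen; omega
    have hmm : ∀ q : Nat, (b * (wm + 1) + q) % (wm + 1) = q % (wm + 1) := fun q => by
      rw [Nat.add_comm, Nat.add_mul_mod_self_right]
    have hc1 : (PySem.Int.mod ((b * (wm + 1) + p : Nat) : Int) ((wm + 1 : Nat) : Int) = 0) ↔ p = 0 := by
      rw [PySem.Int.mod_natCast, hmm p, Nat.mod_eq_of_lt hplt]
      exact Int.natCast_eq_zero
    have hsucc : ((b * (wm + 1) + p : Nat) : Int) + 1 = ((b * (wm + 1) + (p + 1) : Nat) : Int) := by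
      push_cast; ring
    have hc2 : (PySem.Int.mod ((b * (wm + 1) + (p + 1) : Nat) : Int) ((wm + 1 : Nat) : Int) = 0)
        ↔ p + 1 = wm + 1 := by
      rw [PySem.Int.mod_natCast, hmm (p + 1), Int.natCast_eq_zero]
      constructor
      · intro h
        rcases Nat.lt_or_ge (p + 1) (wm + 1) with hlt | hge
        · rw [Nat.mod_eq_of_lt hlt] at h; omega
        · omega
      · intro h; rw [h, Nat.mod_self]
    rw [PySem.List.enumerate_cons, List.foldl_cons]
    simp only [bStep, hsucc, hc1, hc2]
    by_cases hclose : p + 1 = wm + 1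
    · -- the row closes at x: p + 1 = wm + 1 forces rest = []
      have hrest : rest = [] := by
        cases rest with
        | nil => rfl
        | cons a l => simp at hlen; omega
      subst hrest
      rw [if_pos hclose]
      simp only [PySem.List.enumerate_nil, List.foldl_nil]
      have hcc : p + ([x] : List Int).length = wm + 1 ∧ ([x] : List Int) ≠ [] := by simp; omega
      rw [if_pos hcc, if_pos hcc]
      by_cases hp : p = 0 <;> cases show_hex <;> simp [hp, List.append_assoc]
    · rw [if_neg hclose, ih b (p + 1) _ _ (by simp at hlen ⊢; omega)]
      have hcc : (p + (x :: rest).length = wm + 1 ∧ (x :: rest) ≠ []) ↔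
          (p + 1 + rest.length = wm + 1 ∧ rest ≠ []) := by
        constructor
        · rintro ⟨h1, -⟩
          simp only [List.length_cons] at h1
          refine ⟨by omega, ?_⟩
          intro hr; subst hr; simp at h1; omega
        · rintro ⟨h1, -⟩
          exact ⟨by simp; omega, by simp⟩
      have hne1 : ¬ (p + 1 = 0 ∧ rest ≠ []) := by rintro ⟨h, -⟩; omega
      rw [if_neg hne1]
      by_cases hfin : p + 1 + rest.length = wm + 1 ∧ rest ≠ []
      · rw [if_pos hfin, if_pos hfin, if_pos (hcc.mpr hfin), if_pos (hcc.mpr hfin)]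
        by_cases hp : p = 0 <;> cases show_hex <;> simp [hp, List.append_assoc]
      · rw [if_neg hfin, if_neg hfin, if_neg (fun h => hfin (hcc.mp h)),
          if_neg (fun h => hfin (hcc.mp h))]
        by_cases hp : p = 0 <;> simp [hp, List.append_assoc]

-- B's whole loop plus its partial-row epilogue, started at a row boundary
theorem bAll (wm : Nat) (scale : Int) (show_hex : Bool) :
    ∀ (data : List Int) (b : Nat) (L : List String),
    (if (List.foldl (bStep ((wm + 1 : Nat) : Int) scale show_hex) (L, [])
          (PySem.List.enumerate data ((b * (wm + 1) : Nat) : Int))).2 ≠ [] then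
       (if show_hex then
          (List.foldl (bStep ((wm + 1 : Nat) : Int) scale show_hex) (L, [])
              (PySem.List.enumerate data ((b * (wm + 1) : Nat) : Int))).1
            ++ [hexSpan (List.foldl (bStep ((wm + 1 : Nat) : Int) scale show_hex) (L, [])
                (PySem.List.enumerate data ((b * (wm + 1) : Nat) : Int))).2]
        else (List.foldl (bStep ((wm + 1 : Nat) : Int) scale show_hex) (L, [])
            (PySem.List.enumerate data ((b * (wm + 1) : Nat) : Int))).1) ++ ["</div>"]
     else (List.foldl (bStep ((wm + 1 : Nat) : Int) scale show_hex) (L, [])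
         (PySem.List.enumerate data ((b * (wm + 1) : Nat) : Int))).1)
      = L ++ (chunks wm data).flatMap (rowLines scale show_hex) := by
  intro data
  induction hn : data.length using Nat.strong_induction_on generalizing data with
  | _ N ih =>
  intro b L
  match data with
  | [] => simp [chunks_nil]
  | x :: xs =>
    by_cases hfull : wm + 1 ≤ (x :: xs).length
    · -- a full first row, then recurse on the remaining data
      have hclen : ((x :: xs).take (wm + 1)).length = wm + 1 := by
        rw [List.length_take]; omega
      have hchunk := bChunk wm scale show_hex ((x :: xs).take (wm + 1)) b 0 L []
        (by rw [Nat.zero_add, List.length_take]; exact Nat.min_le_left _ _)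
      have hop : (0 : Nat) = 0 ∧ (x :: xs).take (wm + 1) ≠ [] := ⟨rfl, by simp⟩
      have hcl : 0 + ((x :: xs).take (wm + 1)).length = wm + 1 ∧ (x :: xs).take (wm + 1) ≠ [] :=
        ⟨by rw [Nat.zero_add, hclen], by simp⟩
      rw [if_pos hop, if_pos hcl, if_pos hcl] at hchunk
      have hchunk' : List.foldl (bStep ((wm + 1 : Nat) : Int) scale show_hex) (L, [])
          (PySem.List.enumerate ((x :: xs).take (wm + 1)) ((b * (wm + 1) : Nat) : Int))
          = (L ++ rowLines scale show_hex ((x :: xs).take (wm + 1)), ([] : List String)) := by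
        rw [show ((b * (wm + 1) : Nat) : Int) = ((b * (wm + 1) + 0 : Nat) : Int) by norm_num,
          hchunk]
        simp [rowLines]
      have he : PySem.List.enumerate (x :: xs) ((b * (wm + 1) : Nat) : Int)
          = PySem.List.enumerate ((x :: xs).take (wm + 1)) ((b * (wm + 1) : Nat) : Int)
            ++ PySem.List.enumerate ((x :: xs).drop (wm + 1)) (((b + 1) * (wm + 1) : Nat) : Int) := by
        conv_lhs => rw [← List.take_append_drop (wm + 1) (x :: xs)]
        rw [PySem.List.enumerate_append, hclen]
        congr 2
        push_cast; ring
      rw [he, List.foldl_append, hchunk',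
        ih (N - (wm + 1)) (by subst hn; simp only [List.length_cons]; omega)
          ((x :: xs).drop (wm + 1)) (by subst hn; simp only [List.length_drop])
          (b + 1) (L ++ rowLines scale show_hex ((x :: xs).take (wm + 1))),
        chunks_cons]
      simp [List.append_assoc]
    · -- a single partial row: the epilogue closes it
      simp only [List.length_cons, not_le] at hfull
      have hcx : (x :: xs).take (wm + 1) = x :: xs :=
        List.take_of_length_le (by simp only [List.length_cons]; omega)
      have hchunk := bChunk wm scale show_hex (x :: xs) b 0 L []
        (by simp only [List.length_cons]; omega)
      have hop : (0 : Nat) = 0 ∧ (x :: xs) ≠ [] := ⟨rfl, by simp⟩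
      have hcl : ¬ (0 + (x :: xs).length = wm + 1 ∧ (x :: xs) ≠ []) := by
        rintro ⟨h1, -⟩; simp only [List.length_cons, Nat.zero_add] at h1; omega
      rw [if_pos hop, if_neg hcl, if_neg hcl] at hchunk
      rw [show ((b * (wm + 1) : Nat) : Int) = ((b * (wm + 1) + 0 : Nat) : Int) by norm_num,
        hchunk]
      rw [if_pos (show (([] : List String) ++ (x :: xs).map fmtHexU) ≠ [] from by simp)]
      rw [chunks_cons, hcx, List.drop_eq_nil_of_le (by simp only [List.length_cons]; omega),
        chunks_nil]
      cases show_hex <;> simp [rowLines, List.append_assoc]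

-- A's row loop, with its body given only through hf, equals the chunk rendering
theorem aBody (wm : Nat) (scale : Int) (show_hex : Bool) (data : List Int)
    (f : List String → Nat → List String) (L : List String)
    (hf : ∀ acc y, f acc y = acc ++ rowLines scale show_hex ((data.drop ((wm + 1) * y)).take (wm + 1))) :
    (List.range ((data.length + (wm + 1) - 1) / (wm + 1))).foldl f L
      = L ++ (chunks wm data).flatMap (rowLines scale show_hex) := by
  rw [show f = (fun acc y => acc ++ rowLines scale show_hex ((data.drop ((wm + 1) * y)).take (wm + 1)))
      from funext fun acc => funext fun y => hf acc y]
  rw [PySem.List.foldl_append_eq_flatMap, ← chunksEq wm data, List.flatMap_map]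

-- ===== VERDICT (by name: the statement is the Claim_ definition above) =====
theorem to_html_with_legend_spec : Claim_equal_to_html_with_legend := by
  intro data width scale show_hex _ hpre
  unfold Spec_to_html_with_legend
  replace hpre : 0 < width := hpre
  obtain ⟨w, rfl⟩ : ∃ w : Nat, width = (w : Int) :=
    ⟨width.toNat, (Int.toNat_of_nonneg (le_of_lt hpre)).symm⟩
  have hw : 0 < w := by exact_mod_cast hpre
  obtain ⟨wm, rfl⟩ : ∃ wm, w = wm + 1 := ⟨w - 1, by omega⟩
  simp only [to_html_with_legend, to_html_with_legend_alt]
  -- B's side: the streaming loop + epilogue is the chunk rendering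
  have hB := bAll wm scale show_hex data 0 (htmlHead ++ [createLegend])
  simp only [Nat.zero_mul, Nat.cast_zero] at hB
  rw [hB]
  -- A's side: height is the ceiling division, rows are the chunks
  have hheight : (if PySem.Int.mod ((data.length : Int)) ((wm + 1 : Nat) : Int) ≠ 0 then
      PySem.Int.floordiv (data.length : Int) ((wm + 1 : Nat) : Int) + 1 else
      PySem.Int.floordiv (data.length : Int) ((wm + 1 : Nat) : Int))
      = (((data.length + (wm + 1) - 1) / (wm + 1) : Nat) : Int) := by
    rw [PySem.Int.mod_natCast, PySem.Int.floordiv_natCast, ← ceilEq data.length (wm + 1) (by omega)]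
    split_ifs with h1 h2 <;> push_cast <;> omega
  rw [hheight, PySem.List.pyRange_zero_natCast ((data.length + (wm + 1) - 1) / (wm + 1)),
    List.foldl_map,
    aBody wm scale show_hex data _ (htmlHead ++ [createLegend]) ?_]
  intro acc y
  simp only [PySem.List.foldl_append_ite]
  have harg : ∀ x : Int, ((y : Nat) : Int) * (((wm + 1) : Nat) : Int) + x
      = ((((wm + 1) * y : Nat)) : Int) + x := fun x => by push_cast; ring
  simp only [harg]
  simp only [sel data (pixelDiv scale) ((wm + 1) * y) (wm + 1),
    sel data fmtHexU ((wm + 1) * y) (wm + 1)]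
  cases show_hex <;> simp [rowLines, List.append_assoc]
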